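-- pv_equiv track=rewrite | github.com/tedesco2/TP-2-TEDESCO-TUFARO | TP1/TP1_FUNCIONES_TUFARO.py | contador_estados
-- ===== SOURCE A (Python) =====
-- def contador_estados (lista):
--         #cuento la cantidad de quemados, vivos y prendidos que hay en la matriz para llevar el registro
--         quemados = 0
--         vivos = 0
--         prendidos = 0
--         for e1 in lista: #Recorre los valores de la matriz y los analiza
--                 for q1 in e1:
--                         if q1 == 0:
--                                 quemados += 1
--                         elif q1 == -1:
--                                 vivos += 1
--                         elif q1 > 0:
--                                 prendidos += 1
--         return quemados, vivos, prendidos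
-- ===== SOURCE B (Python) =====
-- def contador_estados(lista):
--     # Flatten once, then derive the three totals from the flat list.
--     flat = [v for fila in lista for v in fila]
--     return flat.count(0), flat.count(-1), sum(1 for v in flat if v > 0)
-- ===== Notes on version B (the rewrite author's own statement) =====
-- stated objective: simpler
-- what changed: Replaces the nested classify-on-the-fly loop with three accumulators by a flatten-then-derive pass: flatten the matrix once, then obtain quemados and vivos via list.count and prendidos via a filtered sum.
import Mathlib
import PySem

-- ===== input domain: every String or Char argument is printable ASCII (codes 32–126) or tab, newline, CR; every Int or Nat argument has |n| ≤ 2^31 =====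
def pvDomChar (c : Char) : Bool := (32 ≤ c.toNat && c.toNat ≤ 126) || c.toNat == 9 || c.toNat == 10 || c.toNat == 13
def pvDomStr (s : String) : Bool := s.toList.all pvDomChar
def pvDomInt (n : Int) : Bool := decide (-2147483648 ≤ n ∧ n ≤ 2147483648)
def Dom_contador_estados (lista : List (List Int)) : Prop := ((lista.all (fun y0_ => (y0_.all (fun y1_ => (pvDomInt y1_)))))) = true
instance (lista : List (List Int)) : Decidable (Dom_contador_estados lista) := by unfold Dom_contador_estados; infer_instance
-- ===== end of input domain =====

-- B flattens the matrix once and derives the three totals (two counts and a filtered sum)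
-- instead of classifying each cell on the fly with three accumulators; same cost, simpler shape.

-- helper: the body of A's inner classification (one cell)
def pasoA (acc : Int × Int × Int) (q1 : Int) : Int × Int × Int :=
  let (quemados, vivos, prendidos) := acc
  if q1 == 0 then (quemados + 1, vivos, prendidos)
  else if q1 == -1 then (quemados, vivos + 1, prendidos)
  else if q1 > 0 then (quemados, vivos, prendidos + 1)
  else (quemados, vivos, prendidos)

-- ===== PORT A =====
def contador_estados (lista : List (List Int)) : Int × Int × Int :=
  let s : Int × Int × Int :=
    lista.foldl (fun acc e1 => e1.foldl pasoA acc) (0, 0, 0)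
  s

-- ===== PORT B =====
def contador_estados_alt (lista : List (List Int)) : Int × Int × Int :=
  let flat : List Int := lista.flatMap (fun fila => fila)
  (PySem.List.count flat 0, PySem.List.count flat (-1),
   flat.foldl (fun (acc : Int) v => if 0 < v then acc + 1 else acc) 0)

-- ===== PRECONDITION & SPEC =====
def Spec_contador_estados (lista : List (List Int)) (out : Int × Int × Int) : Prop := out = contador_estados_alt lista
instance (lista : List (List Int)) (out : Int × Int × Int) : Decidable (Spec_contador_estados lista out) := by unfold Spec_contador_estados; infer_instance

-- ===== CLAIM (what is proved, stated in full; the proofs are below) =====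
def Claim_equal_contador_estados : Prop := ∀ (lista : List (List Int)), Dom_contador_estados lista → Spec_contador_estados lista (contador_estados lista)

-- ===== LEMMAS AND PROOFS =====

/-- A's inner row loop, started at any accumulator, adds the row's three counts. -/
lemma inner_loop_eq (row : List Int) (q v p : Int) :
    row.foldl pasoA (q, v, p)
      = (q + row.count 0, v + row.count (-1), p + (row.countP (fun x => decide (0 < x)) : Int)) := by
  induction row generalizing q v p with
  | nil => simp
  | cons x xs ih =>
    rw [List.foldl_cons]
    by_cases h0 : x = 0
    · subst h0
      simp only [pasoA, BEq.rfl, if_true]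
      rw [ih]
      simp
      omega
    · by_cases h1 : x = -1
      · subst h1
        simp only [pasoA]
        norm_num
        rw [ih]
        simp
        omega
      · have hc : pasoA (q, v, p) x = if 0 < x then (q, v, p + 1) else (q, v, p) := by
          simp [pasoA, h0, h1]
        rw [hc]
        by_cases hp : 0 < x
        · simp only [hp, if_true]
          rw [ih]
          simp [h0, h1, hp]
          omega
        · simp only [hp, if_false]
          rw [ih]
          simp [h0, h1, hp]

/-- A's whole nested loop, from any start, adds the flattened counts. -/
lemma outer_loop_eq (lista : List (List Int)) (q v p : Int) :
    lista.foldl (fun acc e1 => e1.foldl pasoA acc) (q, v, p)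
      = (q + ((lista.flatMap (fun fila => fila)).count 0 : Int),
         v + ((lista.flatMap (fun fila => fila)).count (-1) : Int),
         p + ((lista.flatMap (fun fila => fila)).countP (fun x => decide (0 < x)) : Int)) := by
  induction lista generalizing q v p with
  | nil => simp
  | cons r rs ih =>
    rw [List.foldl_cons, inner_loop_eq, ih]
    simp [List.count_append, List.countP_append]
    refine ⟨by omega, by omega, by omega⟩

-- ===== VERDICT (by name: the statement is the Claim_ definition above) =====
theorem contador_estados_spec : Claim_equal_contador_estados := by
  intro lista _
  unfold Spec_contador_estados contador_estados contador_estados_alt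
  rw [outer_loop_eq]
  dsimp only
  rw [PySem.List.foldl_ite_add_one]
  simp [PySem.List.count_eq]
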